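-- pv_equiv track=rewrite | github.com/CCHD/financial_qa | QuestionParser.py | _clear_financial_factor
-- ===== SOURCE A (Python) =====
-- from typing import List, Dict, Tuple
--
-- def _clear_financial_factor(entity_list: Dict, financial_factor_list: Dict) -> Dict:
--     new_entity_list = {}
--     for entity in entity_list:
--         is_cover = False
--         for factor in financial_factor_list:
--             if (entity_list[entity][0] >= financial_factor_list[factor][0] and entity_list[entity][0] <= financial_factor_list[factor][1])\
--                 or (entity_list[entity][0] <= financial_factor_list[factor][0] and entity_list[entity][1] >= financial_factor_list[factor][0]):
--                 is_cover = True
--                 break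
--         if not is_cover:
--             new_entity_list[entity] = entity_list[entity]
--     return new_entity_list
-- ===== SOURCE B (Python) =====
-- # B: sort factor starts once, merge well-formed factor intervals once, then answer each
-- # entity with two binary searches instead of scanning all factors (O((N+M) log M) vs O(N*M)).
--
-- def _bisect_left(a, x):
--     lo, hi = 0, len(a)
--     while lo < hi:
--         mid = (lo + hi) // 2
--         if a[mid] < x:
--             lo = mid + 1
--         else:
--             hi = mid
--     return lo
--
-- def _bisect_right(a, x):
--     lo, hi = 0, len(a)
--     while lo < hi:
--         mid = (lo + hi) // 2
--         if x < a[mid]: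
--             hi = mid
--         else:
--             lo = mid + 1
--     return lo
--
-- def _clear_financial_factor(entity_list, financial_factor_list):
--     starts = sorted(v[0] for v in financial_factor_list.values())
--     ivs = sorted(((v[0], v[1]) for v in financial_factor_list.values() if v[0] <= v[1]),
--                  key=lambda p: p[0])
--     merged = []
--     if ivs:
--         s, e = ivs[0]
--         for a, b in ivs[1:]:
--             if a <= e:
--                 if b > e:
--                     e = b
--             else:
--                 merged.append((s, e))
--                 s, e = a, b
--         merged.append((s, e))
--     mstarts = [p[0] for p in merged]
--     new_entity_list = {}
--     for name, v in entity_list.items():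
--         lo, hi = v[0], v[1]
--         i = _bisect_left(starts, lo)
--         covered = i < len(starts) and starts[i] <= hi
--         if not covered:
--             j = _bisect_right(mstarts, lo)
--             covered = j > 0 and lo <= merged[j - 1][1]
--         if not covered:
--             new_entity_list[name] = v
--     return new_entity_list
-- ===== Notes on version B (the rewrite author's own statement) =====
-- stated objective: faster
-- what changed: A scans the whole factor dict for every entity; B sorts the factor starts once, merges the well-formed factor intervals once, and answers each entity with two binary searches (is the entity's start inside a merged interval? is some factor start inside the entity's interval?), turning O(N*M) into O((N+M) log M).
-- outside the precondition, e.g. on _clear_financial_factor({'e': []}, {}): A returns {'e': []}, B raises IndexError; on _clear_financial_factor({}, {'f': []}): A returns {}, B raises IndexError; on _clear_financial_factor({'e': [5]}, {'f': [0, 9]}): A returns {}, B raises IndexError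
import Mathlib
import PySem

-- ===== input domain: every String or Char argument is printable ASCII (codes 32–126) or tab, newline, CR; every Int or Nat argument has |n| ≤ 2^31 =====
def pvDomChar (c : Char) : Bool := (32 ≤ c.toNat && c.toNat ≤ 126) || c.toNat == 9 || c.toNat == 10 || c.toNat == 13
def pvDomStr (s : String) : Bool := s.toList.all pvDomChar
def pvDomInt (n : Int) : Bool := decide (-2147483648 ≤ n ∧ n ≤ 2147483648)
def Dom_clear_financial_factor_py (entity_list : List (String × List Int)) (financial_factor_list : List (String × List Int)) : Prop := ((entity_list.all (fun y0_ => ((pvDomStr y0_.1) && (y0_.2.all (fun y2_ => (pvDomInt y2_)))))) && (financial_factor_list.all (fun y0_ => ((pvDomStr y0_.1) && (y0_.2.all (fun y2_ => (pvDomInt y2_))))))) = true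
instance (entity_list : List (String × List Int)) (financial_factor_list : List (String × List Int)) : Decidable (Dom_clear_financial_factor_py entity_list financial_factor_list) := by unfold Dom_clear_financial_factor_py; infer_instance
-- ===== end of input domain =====

-- B replaces A's per-entity scan of all factors by one sort+merge of the factor intervals
-- and two binary searches per entity (objective: faster, asymptotically).

-- ===== PORT A =====
-- inner 'for factor in financial_factor_list: … break' loop of A
def pvCoverLoopA (v : List Int) : List (String × List Int) → Bool
  | [] => false
  | f :: rest =>
      if (PySem.List.pyGetD v 0 0 ≥ PySem.List.pyGetD f.2 0 0 ∧ PySem.List.pyGetD v 0 0 ≤ PySem.List.pyGetD f.2 1 0)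
         ∨ (PySem.List.pyGetD v 0 0 ≤ PySem.List.pyGetD f.2 0 0 ∧ PySem.List.pyGetD v 1 0 ≥ PySem.List.pyGetD f.2 0 0)
      then true
      else pvCoverLoopA v rest

def clear_financial_factor_py (entity_list : List (String × List Int)) (financial_factor_list : List (String × List Int)) : List (String × List Int) :=
  entity_list.foldl
    (fun new_entity_list kv =>
      if pvCoverLoopA kv.2 financial_factor_list then new_entity_list
      else new_entity_list ++ [kv])
    []

-- ===== PORT B =====
-- Source B's merge loop: 's, e = ivs[0]; for a, b in ivs[1:]: …; merged.append((s, e))'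
def pvMergeB (ivs : List (Int × Int)) : List (Int × Int) :=
  match ivs with
  | [] => []
  | p :: rest =>
    let st := rest.foldl
      (fun (st : List (Int × Int) × Int × Int) q =>
        if q.1 ≤ st.2.2 then (st.1, st.2.1, if q.2 > st.2.2 then q.2 else st.2.2)
        else (st.1 ++ [(st.2.1, st.2.2)], q.1, q.2))
      ([], p.1, p.2)
    st.1 ++ [(st.2.1, st.2.2)]

-- Source B's per-entity test (its hand-written _bisect_left/_bisect_right are exactly
-- bisect.bisect_left/bisect_right, ported as PySem.List.bisectLeft/bisectRight)
def pvCoveredB (starts : List Int) (merged : List (Int × Int)) (mstarts : List Int) (lo hi : Int) : Bool :=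
  let i := PySem.List.bisectLeft starts lo
  let covered := decide (i < starts.length) && decide (starts.getD i 0 ≤ hi)
  if covered then true
  else
    let j := PySem.List.bisectRight mstarts lo
    decide (0 < j) && decide (lo ≤ (merged.getD (j - 1) (0, 0)).2)

def clear_financial_factor_py_alt (entity_list : List (String × List Int)) (financial_factor_list : List (String × List Int)) : List (String × List Int) :=
  let starts := PySem.List.sorted (financial_factor_list.map (fun kv => PySem.List.pyGetD kv.2 0 0)) (fun x => x) false
  let ivs := PySem.List.sorted
    ((financial_factor_list.map (fun kv => (PySem.List.pyGetD kv.2 0 0, PySem.List.pyGetD kv.2 1 0))).filter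
      (fun p => decide (p.1 ≤ p.2)))
    (fun p => p.1) false
  let merged := pvMergeB ivs
  let mstarts := merged.map (fun p => p.1)
  entity_list.foldl
    (fun new_entity_list kv =>
      if pvCoveredB starts merged mstarts (PySem.List.pyGetD kv.2 0 0) (PySem.List.pyGetD kv.2 1 0) then new_entity_list
      else new_entity_list ++ [kv])
    []

-- ===== PRECONDITION & SPEC =====
-- Pre_ excludes (i) duplicate keys, which a Python dict argument cannot carry (the assoc list
-- would not denote a dict), and (ii) interval lists of length < 2, on which A raises IndexError
-- except in degenerate short-circuit cases (empty factor dict, or an entity covered before its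
-- v[1] is read) where A still returns while B, indexing every interval unconditionally, raises.
def Pre_clear_financial_factor_py (entity_list : List (String × List Int)) (financial_factor_list : List (String × List Int)) : Prop :=
  (entity_list.map Prod.fst).Nodup ∧ (financial_factor_list.map Prod.fst).Nodup ∧
  (∀ kv ∈ entity_list, 2 ≤ kv.2.length) ∧ (∀ kv ∈ financial_factor_list, 2 ≤ kv.2.length)
instance (entity_list : List (String × List Int)) (financial_factor_list : List (String × List Int)) : Decidable (Pre_clear_financial_factor_py entity_list financial_factor_list) := by unfold Pre_clear_financial_factor_py; infer_instance

def pvWitness_clear_financial_factor_py : (List (String × List Int)) × (List (String × List Int)) :=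
  ([("a", [0, 1]), ("b", [12, 15])], [("f", [5, 6]), ("g", [14, 2])])

def Spec_clear_financial_factor_py (entity_list : List (String × List Int)) (financial_factor_list : List (String × List Int)) (out : List (String × List Int)) : Prop := out = clear_financial_factor_py_alt entity_list financial_factor_list
instance (entity_list : List (String × List Int)) (financial_factor_list : List (String × List Int)) (out : List (String × List Int)) : Decidable (Spec_clear_financial_factor_py entity_list financial_factor_list out) := by unfold Spec_clear_financial_factor_py; infer_instance

-- ===== CLAIM (what is proved, stated in full; the proofs are below) =====
def Claim_equal_clear_financial_factor_py : Prop := ∀ (entity_list : List (String × List Int)) (financial_factor_list : List (String × List Int)), Dom_clear_financial_factor_py entity_list financial_factor_list → Pre_clear_financial_factor_py entity_list financial_factor_list → Spec_clear_financial_factor_py entity_list financial_factor_list (clear_financial_factor_py entity_list financial_factor_list)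

-- ===== LEMMAS AND PROOFS =====

-- A's inner loop is an existential over the factor list
theorem pvCoverLoopA_eq_true_iff (v : List Int) (fl : List (String × List Int)) :
    pvCoverLoopA v fl = true ↔
      ∃ f ∈ fl,
        (PySem.List.pyGetD f.2 0 0 ≤ PySem.List.pyGetD v 0 0 ∧ PySem.List.pyGetD v 0 0 ≤ PySem.List.pyGetD f.2 1 0)
        ∨ (PySem.List.pyGetD v 0 0 ≤ PySem.List.pyGetD f.2 0 0 ∧ PySem.List.pyGetD f.2 0 0 ≤ PySem.List.pyGetD v 1 0) := by
  induction fl with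
  | nil => simp [pvCoverLoopA]
  | cons f rest ih =>
      by_cases h : (PySem.List.pyGetD v 0 0 ≥ PySem.List.pyGetD f.2 0 0 ∧ PySem.List.pyGetD v 0 0 ≤ PySem.List.pyGetD f.2 1 0)
         ∨ (PySem.List.pyGetD v 0 0 ≤ PySem.List.pyGetD f.2 0 0 ∧ PySem.List.pyGetD v 1 0 ≥ PySem.List.pyGetD f.2 0 0)
      · simp only [pvCoverLoopA, if_pos h]
        constructor
        · intro _; exact ⟨f, List.mem_cons_self, by tauto⟩
        · intro _; trivial
      · simp only [pvCoverLoopA, if_neg h, ih]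
        constructor
        · rintro ⟨g, hg, hp⟩; exact ⟨g, List.mem_cons_of_mem _ hg, hp⟩
        · rintro ⟨g, hg, hp⟩
          rcases List.mem_cons.mp hg with rfl | hg'
          · exact absurd (by tauto) h
          · exact ⟨g, hg', hp⟩

-- proof-side recursion equivalent to Source B's merge loop
def pvGoMerge (s e : Int) : List (Int × Int) → List (Int × Int)
  | [] => [(s, e)]
  | q :: rest =>
      if q.1 ≤ e then pvGoMerge s (if q.2 > e then q.2 else e) rest
      else (s, e) :: pvGoMerge q.1 q.2 rest

theorem pvMergeB_foldl_eq_go (rest : List (Int × Int)) :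
    ∀ (m : List (Int × Int)) (s e : Int),
      (let st := rest.foldl
        (fun (st : List (Int × Int) × Int × Int) q =>
          if q.1 ≤ st.2.2 then (st.1, st.2.1, if q.2 > st.2.2 then q.2 else st.2.2)
          else (st.1 ++ [(st.2.1, st.2.2)], q.1, q.2))
        (m, s, e)
       st.1 ++ [(st.2.1, st.2.2)]) = m ++ pvGoMerge s e rest := by
  induction rest with
  | nil => intro m s e; simp [pvGoMerge]
  | cons q rest ih =>
      intro m s e
      by_cases h : q.1 ≤ e
      · simp only [List.foldl_cons, if_pos h, pvGoMerge, ih]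
      · simp only [List.foldl_cons, if_neg h, pvGoMerge, ih, List.append_assoc,
          List.singleton_append]

theorem pvMergeB_cons (p : Int × Int) (rest : List (Int × Int)) :
    pvMergeB (p :: rest) = pvGoMerge p.1 p.2 rest := by
  simpa using pvMergeB_foldl_eq_go rest [] p.1 p.2

-- invariant of the merge: same union of points, chain-separated, well-formed, starts ≥ s
theorem pvGoMerge_spec (rest : List (Int × Int)) :
    ∀ (s e : Int), s ≤ e → (∀ q ∈ rest, q.1 ≤ q.2) → (∀ q ∈ rest, s ≤ q.1) →
      rest.Pairwise (fun p q => p.1 ≤ q.1) →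
      (∀ x : Int, ((s ≤ x ∧ x ≤ e) ∨ ∃ q ∈ rest, q.1 ≤ x ∧ x ≤ q.2) ↔
          ∃ p ∈ pvGoMerge s e rest, p.1 ≤ x ∧ x ≤ p.2) ∧
      (pvGoMerge s e rest).Pairwise (fun p q => p.2 < q.1) ∧
      (∀ p ∈ pvGoMerge s e rest, p.1 ≤ p.2) ∧
      (∀ p ∈ pvGoMerge s e rest, s ≤ p.1) := by
  induction rest with
  | nil =>
      intro s e hse _ _ _
      refine ⟨fun x => by simp [pvGoMerge], by simp [pvGoMerge], fun p hp => ?_, fun p hp => ?_⟩ <;>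
        obtain rfl := List.mem_singleton.mp (by simpa [pvGoMerge] using hp)
      · exact hse
      · exact le_rfl
  | cons q rest ih =>
      intro s e hse hwf hs hsorted
      have hq2 : q.1 ≤ q.2 := hwf q List.mem_cons_self
      have hsq : s ≤ q.1 := hs q List.mem_cons_self
      have hwf' : ∀ r ∈ rest, r.1 ≤ r.2 := fun r hr => hwf r (List.mem_cons_of_mem _ hr)
      have hsorted' : rest.Pairwise (fun p q => p.1 ≤ q.1) := (List.pairwise_cons.mp hsorted).2
      have hqrest : ∀ r ∈ rest, q.1 ≤ r.1 := (List.pairwise_cons.mp hsorted).1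
      by_cases h : q.1 ≤ e
      · -- merge q into the running interval
        have he' : s ≤ (if q.2 > e then q.2 else e) := by split <;> omega
        obtain ⟨ha, hb, hc, hd⟩ := ih s (if q.2 > e then q.2 else e) he' hwf'
          (fun r hr => hs r (List.mem_cons_of_mem _ hr)) hsorted'
        rw [pvGoMerge, if_pos h]
        refine ⟨fun x => ?_, hb, hc, hd⟩
        rw [← ha x, List.exists_mem_cons_iff]
        constructor
        · rintro (hx | hx | ⟨r, hr, hrx⟩)
          · exact Or.inl ⟨hx.1, by have := hx.2; split <;> omega⟩
          · exact Or.inl ⟨le_trans hsq hx.1, by have := hx.2; split <;> omega⟩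
          · exact Or.inr ⟨r, hr, hrx⟩
        · rintro (hx | ⟨r, hr, hrx⟩)
          · by_cases hxe : x ≤ e
            · exact Or.inl ⟨hx.1, hxe⟩
            · refine Or.inr (Or.inl ⟨?_, ?_⟩) <;> (have := hx.2; split_ifs at this <;> omega)
          · exact Or.inr (Or.inr ⟨r, hr, hrx⟩)
      · -- close (s, e) and restart at q
        obtain ⟨ha, hb, hc, hd⟩ := ih q.1 q.2 hq2 hwf' hqrest hsorted'
        rw [pvGoMerge, if_neg h]
        refine ⟨fun x => ?_, ?_, ?_, ?_⟩
        · rw [List.exists_mem_cons_iff, List.exists_mem_cons_iff, ← ha x]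
        · refine List.pairwise_cons.mpr ⟨fun p hp => ?_, hb⟩
          exact lt_of_lt_of_le (by omega) (hd p hp)
        · rintro p hp
          rcases List.mem_cons.mp hp with rfl | hp'
          · exact hse
          · exact hc p hp'
        · rintro p hp
          rcases List.mem_cons.mp hp with rfl | hp'
          · exact le_rfl
          · exact le_trans hsq (hd p hp')

-- bisect_left finds a factor start inside [lo, hi] iff one exists
theorem pvBisectLeft_window (starts : List Int) (lo hi : Int)
    (hs : starts.Pairwise (fun a b => a ≤ b)) :
    ((PySem.List.bisectLeft starts lo < starts.length) ∧
       starts.getD (PySem.List.bisectLeft starts lo) 0 ≤ hi) ↔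
      ∃ t ∈ starts, lo ≤ t ∧ t ≤ hi := by
  obtain ⟨hle, hlt, hge⟩ := PySem.List.bisectLeft_spec starts lo hs
  constructor
  · rintro ⟨hi1, hi2⟩
    exact ⟨starts[PySem.List.bisectLeft starts lo], List.getElem_mem hi1,
      hge _ hi1 le_rfl, by rwa [List.getD_eq_getElem _ _ hi1] at hi2⟩
  · rintro ⟨t, ht, hlot, hthi⟩
    obtain ⟨k, hk, rfl⟩ := List.mem_iff_getElem.mp ht
    have hik : PySem.List.bisectLeft starts lo ≤ k := by
      by_contra hik
      exact absurd (hlt k hk (by omega)) (not_lt.mpr hlot)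
    have hi1 : PySem.List.bisectLeft starts lo < starts.length := lt_of_le_of_lt hik hk
    refine ⟨hi1, ?_⟩
    rw [List.getD_eq_getElem _ _ hi1]
    rcases eq_or_lt_of_le hik with heq | hlt'
    · subst heq; exact hthi
    · exact le_trans (List.pairwise_iff_getElem.mp hs _ _ hi1 hk hlt') hthi

-- bisect_right locates lo in the chain-separated merged list iff some interval contains it
theorem pvBisectRight_merged (merged : List (Int × Int)) (lo : Int)
    (hchain : merged.Pairwise (fun p q => p.2 < q.1))
    (hwf : ∀ p ∈ merged, p.1 ≤ p.2) :
    ((0 < PySem.List.bisectRight (merged.map (fun p => p.1)) lo) ∧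
       lo ≤ (merged.getD (PySem.List.bisectRight (merged.map (fun p => p.1)) lo - 1) (0, 0)).2) ↔
      ∃ p ∈ merged, p.1 ≤ lo ∧ lo ≤ p.2 := by
  have hms : (merged.map (fun p => p.1)).Pairwise (fun a b => a ≤ b) := by
    refine List.pairwise_iff_getElem.mpr ?_
    intro a b ha hb hab
    simp only [List.getElem_map]
    have hbm : b < merged.length := by simpa using hb
    have := List.pairwise_iff_getElem.mp hchain a b (by simpa using ha) hbm (by omega)
    have := hwf merged[a] (List.getElem_mem _)
    omega
  obtain ⟨hle, hlt, hge⟩ := PySem.List.bisectRight_spec (merged.map (fun p => p.1)) lo hms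
  simp only [List.length_map, List.getElem_map] at hle hlt hge
  set j := PySem.List.bisectRight (merged.map (fun p => p.1)) lo with hj
  constructor
  · rintro ⟨hj0, hj2⟩
    have hjm : j - 1 < merged.length := by omega
    refine ⟨merged[j - 1], List.getElem_mem hjm, ?_, ?_⟩
    · exact hlt (j - 1) hjm (by omega)
    · rwa [List.getD_eq_getElem _ _ hjm] at hj2
  · rintro ⟨p, hp, hp1, hp2⟩
    obtain ⟨k, hk, rfl⟩ := List.mem_iff_getElem.mp hp
    have hkj : k < j := by
      by_contra hkj
      exact absurd (hge k hk (by omega)) (not_lt.mpr hp1)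
    have hj0 : 0 < j := by omega
    have hjm : j - 1 < merged.length := by omega
    have hkeq : k = j - 1 := by
      by_contra hkne
      have hklt : k < j - 1 := by omega
      have h1 := List.pairwise_iff_getElem.mp hchain k (j - 1) hk hjm hklt
      have h2 := hlt (j - 1) hjm (by omega)
      omega
    subst hkeq
    refine ⟨hj0, ?_⟩
    rw [List.getD_eq_getElem _ _ hjm]
    exact hp2

-- pvCoveredB as a proposition
theorem pvCoveredB_eq_true_iff (starts : List Int) (merged : List (Int × Int)) (mstarts : List Int) (lo hi : Int) :
    pvCoveredB starts merged mstarts lo hi = true ↔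
      ((PySem.List.bisectLeft starts lo < starts.length ∧
          starts.getD (PySem.List.bisectLeft starts lo) 0 ≤ hi) ∨
        (0 < PySem.List.bisectRight mstarts lo ∧
          lo ≤ (merged.getD (PySem.List.bisectRight mstarts lo - 1) (0, 0)).2)) := by
  simp only [pvCoveredB]
  split_ifs with h
  · simp only [true_iff]
    exact Or.inl (by simpa using h)
  · simp only [Bool.and_eq_true, decide_eq_true_iff] at h ⊢
    tauto

-- the merged list covers the same points as the well-formed intervals, is chain-separated, well-formed
theorem pvMergeB_props (ivs : List (Int × Int))
    (hsorted : ivs.Pairwise (fun p q => p.1 ≤ q.1)) (hwf : ∀ q ∈ ivs, q.1 ≤ q.2) :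
    (∀ x : Int, (∃ q ∈ ivs, q.1 ≤ x ∧ x ≤ q.2) ↔ ∃ p ∈ pvMergeB ivs, p.1 ≤ x ∧ x ≤ p.2) ∧
    (pvMergeB ivs).Pairwise (fun p q => p.2 < q.1) ∧ (∀ p ∈ pvMergeB ivs, p.1 ≤ p.2) := by
  cases ivs with
  | nil => simp [pvMergeB]
  | cons p rest =>
      rw [pvMergeB_cons]
      obtain ⟨ha, hb, hc, _⟩ := pvGoMerge_spec rest p.1 p.2 (hwf p List.mem_cons_self)
        (fun r hr => hwf r (List.mem_cons_of_mem _ hr))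
        (List.pairwise_cons.mp hsorted).1 (List.pairwise_cons.mp hsorted).2
      exact ⟨fun x => by rw [List.exists_mem_cons_iff, ha x], hb, hc⟩

-- per-entity agreement of the two cover tests
theorem pvCovered_agree (fl : List (String × List Int)) (v : List Int) :
    pvCoverLoopA v fl =
      pvCoveredB
        (PySem.List.sorted (fl.map (fun kv => PySem.List.pyGetD kv.2 0 0)) (fun x => x) false)
        (pvMergeB (PySem.List.sorted
          ((fl.map (fun kv => (PySem.List.pyGetD kv.2 0 0, PySem.List.pyGetD kv.2 1 0))).filter
            (fun p => decide (p.1 ≤ p.2))) (fun p => p.1) false))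
        ((pvMergeB (PySem.List.sorted
          ((fl.map (fun kv => (PySem.List.pyGetD kv.2 0 0, PySem.List.pyGetD kv.2 1 0))).filter
            (fun p => decide (p.1 ≤ p.2))) (fun p => p.1) false)).map (fun p => p.1))
        (PySem.List.pyGetD v 0 0) (PySem.List.pyGetD v 1 0) := by
  set lo := PySem.List.pyGetD v 0 0 with hlo
  set hi := PySem.List.pyGetD v 1 0 with hhi
  set starts := PySem.List.sorted (fl.map (fun kv => PySem.List.pyGetD kv.2 0 0)) (fun x => x) false with hst
  set ivs := PySem.List.sorted
    ((fl.map (fun kv => (PySem.List.pyGetD kv.2 0 0, PySem.List.pyGetD kv.2 1 0))).filter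
      (fun p => decide (p.1 ≤ p.2))) (fun p => p.1) false with hivs
  set merged := pvMergeB ivs with hm
  have hs : starts.Pairwise (fun a b => a ≤ b) := by
    simpa using PySem.List.sorted_pairwise (fl.map (fun kv => PySem.List.pyGetD kv.2 0 0)) (fun x : Int => x)
  have hsorted_ivs : ivs.Pairwise (fun p q : Int × Int => p.1 ≤ q.1) :=
    PySem.List.sorted_pairwise _ _
  have hwf_ivs : ∀ q ∈ ivs, q.1 ≤ q.2 := by
    intro q hq
    have := (List.mem_filter.mp ((PySem.List.mem_sorted _ _ _ _).mp hq)).2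
    simpa using this
  obtain ⟨hun, hchain, hwfm⟩ := pvMergeB_props ivs hsorted_ivs hwf_ivs
  have h2 := pvBisectLeft_window starts lo hi hs
  have h5 := pvBisectRight_merged merged lo hchain hwfm
  have h1 : (∃ f ∈ fl, lo ≤ PySem.List.pyGetD f.2 0 0 ∧ PySem.List.pyGetD f.2 0 0 ≤ hi) ↔
      ∃ t ∈ starts, lo ≤ t ∧ t ≤ hi := by
    constructor
    · rintro ⟨f, hf, hp⟩
      exact ⟨PySem.List.pyGetD f.2 0 0,
        (PySem.List.mem_sorted _ _ _ _).mpr (List.mem_map_of_mem hf), hp⟩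
    · rintro ⟨t, ht, hp⟩
      obtain ⟨f, hf, rfl⟩ := List.mem_map.mp ((PySem.List.mem_sorted _ _ _ _).mp ht)
      exact ⟨f, hf, hp⟩
  have h3 : (∃ f ∈ fl, PySem.List.pyGetD f.2 0 0 ≤ lo ∧ lo ≤ PySem.List.pyGetD f.2 1 0) ↔
      ∃ q ∈ ivs, q.1 ≤ lo ∧ lo ≤ q.2 := by
    constructor
    · rintro ⟨f, hf, hp1, hp2⟩
      refine ⟨(PySem.List.pyGetD f.2 0 0, PySem.List.pyGetD f.2 1 0), ?_, hp1, hp2⟩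
      exact (PySem.List.mem_sorted _ _ _ _).mpr
        (List.mem_filter.mpr ⟨List.mem_map_of_mem hf, by simp; omega⟩)
    · rintro ⟨q, hq, hp1, hp2⟩
      obtain ⟨f, hf, rfl⟩ :=
        List.mem_map.mp (List.mem_filter.mp ((PySem.List.mem_sorted _ _ _ _).mp hq)).1
      exact ⟨f, hf, hp1, hp2⟩
  rw [Bool.eq_iff_iff, pvCoverLoopA_eq_true_iff, pvCoveredB_eq_true_iff]
  constructor
  · rintro ⟨f, hf, hp | hp⟩
    · exact Or.inr (h5.mpr ((hun lo).mp (h3.mp ⟨f, hf, hp⟩)))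
    · exact Or.inl (h2.mpr (h1.mp ⟨f, hf, hp⟩))
  · rintro (hc | hc)
    · obtain ⟨f, hf, hp⟩ := h1.mpr (h2.mp hc)
      exact ⟨f, hf, Or.inr hp⟩
    · obtain ⟨f, hf, hp⟩ := h3.mpr ((hun lo).mpr (h5.mp hc))
      exact ⟨f, hf, Or.inl hp⟩

-- ===== VERDICT (by name: the statement is the Claim_ definition above) =====
theorem clear_financial_factor_py_spec : Claim_equal_clear_financial_factor_py := by
  intro el fl _ _
  unfold Spec_clear_financial_factor_py clear_financial_factor_py clear_financial_factor_py_alt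
  have hfun := pvCovered_agree fl
  congr 1
  funext acc kv
  rw [hfun kv.2]
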